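-- pv_equiv track=rewrite | github.com/jefflester/minitrino | src/cli/minitrino/core/cluster/config.py | _handle_password_authenticators
-- ===== SOURCE A (Python) =====
-- def _handle_password_authenticators(cfgs):
--     """Merge multiple password authenticators."""
--     merge = []
--     for i, cfg in enumerate(cfgs):
--         if cfg[0] == "key_value" and cfg[1] == "http-server.authentication.type":
--             merge.append(i)
--     if not merge:
--         return cfgs
--     values = [cfgs[i][2].upper() for i in merge]
--     auth_property = (
--         "key_value",
--         "http-server.authentication.type",
--         ",".join(values),
--     )
--     new_cfgs = [x for i, x in enumerate(cfgs) if i not in merge]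
--     new_cfgs.append(auth_property)
--     return new_cfgs
-- ===== SOURCE B (Python) =====
-- def _handle_password_authenticators(cfgs):
--     """Merge multiple password authenticators (single partitioning pass)."""
--     new_cfgs = []
--     values = []
--     for cfg in cfgs:
--         if cfg[0] == "key_value" and cfg[1] == "http-server.authentication.type":
--             values.append(cfg[2].upper())
--         else:
--             new_cfgs.append(cfg)
--     if not values:
--         return cfgs
--     new_cfgs.append(
--         ("key_value", "http-server.authentication.type", ",".join(values))
--     )
--     return new_cfgs
-- ===== Notes on version B (the rewrite author's own statement) =====
-- stated objective: simpler
-- what changed: Replaces A's three passes (collect matching indices, map indices back through cfgs[i] lookups, filter by index membership in the merge list) with a single partitioning loop over the entries that keeps no index bookkeeping.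
-- outside the precondition, e.g. on _handle_password_authenticators([()]): A raises IndexError, B raises IndexError; on _handle_password_authenticators([('key_value', 'http-server.authentication.type')]): A raises IndexError, B raises IndexError
import Mathlib
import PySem

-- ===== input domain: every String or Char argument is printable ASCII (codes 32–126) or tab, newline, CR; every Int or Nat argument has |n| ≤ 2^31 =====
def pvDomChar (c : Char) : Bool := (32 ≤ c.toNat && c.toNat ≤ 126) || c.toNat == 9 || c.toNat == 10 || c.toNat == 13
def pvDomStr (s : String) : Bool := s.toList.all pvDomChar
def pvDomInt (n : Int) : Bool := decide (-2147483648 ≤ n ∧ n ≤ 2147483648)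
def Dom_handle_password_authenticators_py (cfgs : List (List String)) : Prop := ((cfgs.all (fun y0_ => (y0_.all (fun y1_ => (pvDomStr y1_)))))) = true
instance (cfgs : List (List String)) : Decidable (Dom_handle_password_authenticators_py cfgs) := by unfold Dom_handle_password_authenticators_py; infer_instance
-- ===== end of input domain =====

-- B replaces A's three passes (index collection, value lookup by index, index-membership filter)
-- by one partitioning pass with no index bookkeeping; objective: simpler.

-- shared helper: the test 'cfg[0] == "key_value" and cfg[1] == "http-server.authentication.type"'
-- (both Pythons contain this exact condition; pyGetD's default is never the deciding value inside Pre_)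
def isAuthType (cfg : List String) : Bool :=
  PySem.List.pyGetD cfg 0 "" == "key_value" &&
    PySem.List.pyGetD cfg 1 "" == "http-server.authentication.type"

-- shared helper: 'cfg[2].upper()' (in A applied to cfgs[i], in B to the loop variable)
def authVal (cfg : List String) : String :=
  PySem.Str.upper (PySem.List.pyGetD cfg 2 "")

-- ===== PORT A =====
def handle_password_authenticators_py (cfgs : List (List String)) : List (List String) :=
  let merge : List Int := (PySem.List.enumerate cfgs 0).foldl
      (fun acc p => if isAuthType p.2 then acc ++ [p.1] else acc) []
  if merge = [] then cfgs
  else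
    let values : List String := merge.map (fun i => authVal (PySem.List.pyGetD cfgs i []))
    let authProperty : List String :=
      ["key_value", "http-server.authentication.type", PySem.Str.join "," values]
    let newCfgs : List (List String) := (PySem.List.enumerate cfgs 0).foldl
      (fun acc p => if p.1 ∈ merge then acc else acc ++ [p.2]) []
    newCfgs ++ [authProperty]

-- ===== PORT B =====
def handle_password_authenticators_py_alt (cfgs : List (List String)) : List (List String) :=
  let st := cfgs.foldl
      (fun acc cfg =>
        if isAuthType cfg then (acc.1, acc.2 ++ [authVal cfg]) else (acc.1 ++ [cfg], acc.2))
      (([] : List (List String)), ([] : List String))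
  if st.2 = [] then cfgs
  else st.1 ++ [["key_value", "http-server.authentication.type", PySem.Str.join "," st.2]]

-- ===== PRECONDITION & SPEC =====
-- Pre_ excludes exactly the inputs where Python A raises IndexError: an empty entry (cfg[0]),
-- an entry ["key_value"] (cfg[1]), or a matching entry of length 2 (cfg[2]).
def pvEntryOK (cfg : List String) : Bool :=
  match cfg with
  | [] => false
  | [a] => a != "key_value"
  | [a, b] => !(a == "key_value" && b == "http-server.authentication.type")
  | _ => true

def Pre_handle_password_authenticators_py (cfgs : List (List String)) : Prop :=
  cfgs.all pvEntryOK = true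
instance (cfgs : List (List String)) : Decidable (Pre_handle_password_authenticators_py cfgs) := by
  unfold Pre_handle_password_authenticators_py; infer_instance

def pvWitness_handle_password_authenticators_py : List (List String) :=
  [["key_value", "http-server.authentication.type", "password"],
   ["key_value", "node.id", "n1"],
   ["key_value", "http-server.authentication.type", "ldap"]]

def Spec_handle_password_authenticators_py (cfgs : List (List String)) (out : List (List String)) : Prop := out = handle_password_authenticators_py_alt cfgs
instance (cfgs : List (List String)) (out : List (List String)) : Decidable (Spec_handle_password_authenticators_py cfgs out) := by unfold Spec_handle_password_authenticators_py; infer_instance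

-- ===== CLAIM (what is proved, stated in full; the proofs are below) =====
def Claim_equal_handle_password_authenticators_py : Prop := ∀ (cfgs : List (List String)), Dom_handle_password_authenticators_py cfgs → Pre_handle_password_authenticators_py cfgs → Spec_handle_password_authenticators_py cfgs (handle_password_authenticators_py cfgs)

-- ===== LEMMAS AND PROOFS =====

-- the canonical merged form both programs compute
def mergedForm (cfgs : List (List String)) : List (List String) :=
  if cfgs.filter isAuthType = [] then cfgs
  else
    cfgs.filter (fun c => !isAuthType c) ++
      [["key_value", "http-server.authentication.type",
        PySem.Str.join "," ((cfgs.filter isAuthType).map authVal)]]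

lemma alt_fold (cfgs : List (List String)) (nc : List (List String)) (vs : List String) :
    cfgs.foldl
      (fun acc cfg =>
        if isAuthType cfg then (acc.1, acc.2 ++ [authVal cfg]) else (acc.1 ++ [cfg], acc.2))
      (nc, vs)
    = (nc ++ cfgs.filter (fun c => !isAuthType c),
       vs ++ (cfgs.filter isAuthType).map authVal) := by
  induction cfgs generalizing nc vs with
  | nil => simp
  | cons x xs ih => by_cases h : isAuthType x <;> simp [h, ih]

lemma alt_char (cfgs : List (List String)) :
    handle_password_authenticators_py_alt cfgs = mergedForm cfgs := by
  simp only [handle_password_authenticators_py_alt, mergedForm, alt_fold, List.nil_append]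
  by_cases h : cfgs.filter isAuthType = [] <;> simp [h]

-- members of the enumeration, restated for rewriting
lemma mem_enum_lookup (cfgs : List (List String)) (p : Int × List String)
    (hp : p ∈ PySem.List.enumerate cfgs 0) :
    PySem.List.pyGetD cfgs p.1 [] = p.2 := by
  rcases (PySem.List.mem_enumerate_iff cfgs 0 p).1 hp with ⟨k, hk, rfl⟩
  simp [PySem.List.pyGetD_natCast, List.getD, hk]

-- A's index list is the filtered enumeration's first components
lemma merge_eq (cfgs : List (List String)) :
    (PySem.List.enumerate cfgs 0).foldl
      (fun acc p => if isAuthType p.2 then acc ++ [p.1] else acc) []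
    = ((PySem.List.enumerate cfgs 0).filter (fun p => isAuthType p.2)).map (·.1) := by
  simpa using PySem.List.foldl_append_if (fun p : Int × List String => isAuthType p.2)
    (fun p : Int × List String => p.1) (PySem.List.enumerate cfgs 0) []

lemma snd_filter_enum (cfgs : List (List String)) (q : List String → Bool) :
    ((PySem.List.enumerate cfgs 0).filter (fun p => q p.2)).map (·.2)
      = cfgs.filter q := by
  have := List.filter_map (f := fun p : Int × List String => p.2)
      (l := PySem.List.enumerate cfgs 0) (p := q)
  simpa [PySem.List.map_snd_enumerate] using this.symm

-- index membership in merge decides the predicate on the element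
lemma mem_merge_iff (cfgs : List (List String)) (p : Int × List String)
    (hp : p ∈ PySem.List.enumerate cfgs 0) :
    (p.1 ∈ ((PySem.List.enumerate cfgs 0).filter (fun q => isAuthType q.2)).map (·.1))
      ↔ isAuthType p.2 = true := by
  constructor
  · intro h
    rcases List.mem_map.1 h with ⟨q, hq, hfst⟩
    have hq' := List.mem_filter.1 hq
    rcases (PySem.List.mem_enumerate_iff cfgs 0 p).1 hp with ⟨k, hk, rfl⟩
    rcases (PySem.List.mem_enumerate_iff cfgs 0 q).1 hq'.1 with ⟨k', hk', rfl⟩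
    have hkk : k' = k := by
      have : ((k' : Int)) = (k : Int) := by simpa using hfst
      exact_mod_cast this
    subst hkk
    simpa using hq'.2
  · intro h
    exact List.mem_map.2 ⟨p, List.mem_filter.2 ⟨hp, by simpa using h⟩, rfl⟩

-- the second loop of A: skip the merged indices
lemma newcfgs_fold (l : List (Int × List String)) (m : List Int) (acc : List (List String)) :
    l.foldl (fun acc p => if p.1 ∈ m then acc else acc ++ [p.2]) acc
    = acc ++ (l.filter (fun p => !(decide (p.1 ∈ m)))).map (·.2) := by
  induction l generalizing acc with
  | nil => simp
  | cons x xs ih => by_cases h : x.1 ∈ m <;> simp [h, ih]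

lemma a_char (cfgs : List (List String)) :
    handle_password_authenticators_py cfgs = mergedForm cfgs := by
  simp only [handle_password_authenticators_py, merge_eq]
  set enum := PySem.List.enumerate cfgs 0 with henum
  set fe := enum.filter (fun p => isAuthType p.2) with hfe
  have hsnd : fe.map (·.2) = cfgs.filter isAuthType := snd_filter_enum cfgs isAuthType
  by_cases h : fe.map (·.1) = []
  · have hfe_nil : fe = [] := by simpa using h
    have : cfgs.filter isAuthType = [] := by rw [← hsnd, hfe_nil]; simp
    simp [h, mergedForm, this]
  · have hfe_ne : fe ≠ [] := by intro hc; exact h (by simp [hc])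
    have hfilter_ne : cfgs.filter isAuthType ≠ [] := by
      rw [← hsnd]; intro hc; exact hfe_ne (by simpa using hc)
    have hkept : enum.foldl
        (fun acc p => if p.1 ∈ fe.map (·.1) then acc else acc ++ [p.2]) []
        = cfgs.filter (fun c => !isAuthType c) := by
      rw [newcfgs_fold, List.nil_append]
      have hcong : enum.filter (fun p => !(decide (p.1 ∈ fe.map (·.1))))
          = enum.filter (fun p => !isAuthType p.2) := by
        apply List.filter_congr
        intro p hp
        have hmm := mem_merge_iff cfgs p (by simpa [henum] using hp)
        by_cases hP : isAuthType p.2 = true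
        · have hin : p.1 ∈ fe.map (·.1) := by simpa [hfe, henum] using hmm.2 hP
          simp [hP, hin]
        · have hout : p.1 ∉ fe.map (·.1) := fun hc =>
            hP (hmm.1 (by simpa [hfe, henum] using hc))
          simp [hP, hout]
      rw [hcong]
      exact snd_filter_enum cfgs (fun c => !isAuthType c)
    have hvals : (fe.map (·.1)).map (fun i => authVal (PySem.List.pyGetD cfgs i []))
        = (cfgs.filter isAuthType).map authVal := by
      rw [List.map_map]
      have hcong : fe.map ((fun i => authVal (PySem.List.pyGetD cfgs i [])) ∘ (·.1))
          = fe.map (fun p => authVal p.2) := by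
        apply List.map_congr_left
        intro p hp
        have hpe : p ∈ enum := (List.mem_filter.1 hp).1
        simp [Function.comp, mem_enum_lookup cfgs p (by simpa [henum] using hpe)]
      rw [hcong, ← hsnd, List.map_map]
      rfl
    simp only [h, mergedForm, if_neg hfilter_ne, hkept, hvals]
    simp

-- ===== VERDICT (by name: the statement is the Claim_ definition above) =====
theorem handle_password_authenticators_py_spec : Claim_equal_handle_password_authenticators_py := by
  intro cfgs _ _
  unfold Spec_handle_password_authenticators_py
  rw [a_char, alt_char]
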